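-- pv_equiv track=rewrite | github.com/ivigilante/curso-python-itba | clase_2/chaos.py | traducir
-- ===== SOURCE A (Python) =====
-- diccionario = {"hola":"你好","como":"how","estás":"estáis","ve":"regards","bien":"bom","se":"it"}
--
-- def traducir(texto):
-- 	word = ""
-- 	traduccion = ""
-- 	for char in texto:
-- 		if char.isalpha():
-- 			word += char
-- 		else:
-- 			traduccion += diccionario.get(word,"") + char
-- 			word = ""
-- 	return traduccion
-- ===== SOURCE B (Python) =====
-- diccionario = {"hola":"你好","como":"how","estás":"estáis","ve":"regards","bien":"bom","se":"it"}
--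
-- def _runs(texto):
--     # maximal runs of same .isalpha() class (hand-rolled groupby)
--     runs = []
--     i, n = 0, len(texto)
--     while i < n:
--         k = texto[i].isalpha()
--         j = i + 1
--         while j < n and texto[j].isalpha() == k:
--             j += 1
--         runs.append((k, texto[i:j]))
--         i = j
--     return runs
--
-- def traducir(texto):
--     pending = ""
--     partes = []
--     for alpha, run in _runs(texto):
--         if alpha:
--             pending = run
--         else:
--             partes.append(diccionario.get(pending, "") + run)
--             pending = ""
--     return "".join(partes)
-- ===== Notes on version B (the rewrite author's own statement) =====
-- stated objective: alternative
-- what changed: B splits the text into maximal alpha/non-alpha runs first and then translates once per non-alpha run, instead of A's per-character accumulation into two growing strings.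
import Mathlib
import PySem

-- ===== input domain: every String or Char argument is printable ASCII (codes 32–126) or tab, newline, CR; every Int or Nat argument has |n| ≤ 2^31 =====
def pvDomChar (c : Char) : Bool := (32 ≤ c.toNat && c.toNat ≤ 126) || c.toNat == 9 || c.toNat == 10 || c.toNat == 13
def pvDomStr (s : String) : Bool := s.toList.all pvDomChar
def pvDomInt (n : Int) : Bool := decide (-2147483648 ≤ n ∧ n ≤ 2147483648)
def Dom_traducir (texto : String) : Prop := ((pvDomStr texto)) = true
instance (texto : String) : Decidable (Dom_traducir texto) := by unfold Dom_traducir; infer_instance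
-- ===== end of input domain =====

-- B translates once per maximal non-alpha run (group-by runs) instead of A's per-character
-- accumulation; objective: alternative decomposition, same cost.

-- ===== PORT A =====
def diccionario : PySem.Dict (List Char) (List Char) :=
  PySem.Dict.ofList [("hola".toList, "你好".toList), ("como".toList, "how".toList),
    ("estás".toList, "estáis".toList), ("ve".toList, "regards".toList),
    ("bien".toList, "bom".toList), ("se".toList, "it".toList)]

-- A's for-loop over the characters, state = (word, traduccion)
def traducirLoop : List Char → List Char × List Char → List Char × List Char
  | [], s => s
  | c :: cs, (word, trad) =>
      if PySem.Chars.isalpha c then traducirLoop cs (word ++ [c], trad)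
      else traducirLoop cs ([], trad ++ diccionario.getD word [] ++ [c])

def traducir (texto : String) : String :=
  String.ofList (traducirLoop texto.toList ([], [])).2

-- ===== PORT B =====
-- maximal runs of equal isalpha-class, paired with that class (Source B's _runs)
def groupRuns : List Char → List (Bool × List Char)
  | [] => []
  | c :: cs =>
      let k := PySem.Chars.isalpha c
      (k, c :: cs.takeWhile (fun d => PySem.Chars.isalpha d == k)) ::
        groupRuns (cs.dropWhile (fun d => PySem.Chars.isalpha d == k))
  termination_by l => l.length
  decreasing_by
    simp only [List.length_cons]
    exact Nat.lt_succ_of_le (List.length_dropWhile_le _ _)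

-- Source B's per-run loop body, state = (pending, partes)
def bStep (s : List Char × List (List Char)) (g : Bool × List Char) :
    List Char × List (List Char) :=
  if g.1 then (g.2, s.2) else ([], s.2 ++ [diccionario.getD s.1 [] ++ g.2])

def traducir_alt (texto : String) : String :=
  String.ofList (((groupRuns texto.toList).foldl bStep ([], [])).2.flatten)

-- ===== PRECONDITION & SPEC =====
def Spec_traducir (texto : String) (out : String) : Prop := out = traducir_alt texto
instance (texto : String) (out : String) : Decidable (Spec_traducir texto out) := by unfold Spec_traducir; infer_instance

-- ===== CLAIM (what is proved, stated in full; the proofs are below) =====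
def Claim_equal_traducir : Prop := ∀ (texto : String), Dom_traducir texto → Spec_traducir texto (traducir texto)

-- ===== LEMMAS AND PROOFS =====

lemma getD_nil : diccionario.getD [] [] = [] := by decide

lemma loop_alpha (r : List Char) (rest w t : List Char)
    (h : ∀ c ∈ r, PySem.Chars.isalpha c = true) :
    traducirLoop (r ++ rest) (w, t) = traducirLoop rest (w ++ r, t) := by
  induction r generalizing w with
  | nil => simp
  | cons c r ih =>
      have hc := h c (by simp)
      simp only [List.cons_append, traducirLoop, hc, if_pos]
      rw [ih _ (fun d hd => h d (by simp [hd]))]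
      simp

lemma loop_nonalpha_tail (r : List Char) (rest t : List Char)
    (h : ∀ c ∈ r, PySem.Chars.isalpha c = false) :
    traducirLoop (r ++ rest) ([], t) = traducirLoop rest ([], t ++ r) := by
  induction r generalizing t with
  | nil => simp
  | cons c r ih =>
      have hc := h c (by simp)
      simp only [List.cons_append, traducirLoop, hc, if_neg, Bool.false_eq_true,
        not_false_iff, getD_nil, List.append_nil]
      rw [ih _ (fun d hd => h d (by simp [hd]))]
      simp

lemma loop_nonalpha (c : Char) (r : List Char) (rest w t : List Char)
    (hc : PySem.Chars.isalpha c = false)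
    (h : ∀ d ∈ r, PySem.Chars.isalpha d = false) :
    traducirLoop ((c :: r) ++ rest) (w, t)
      = traducirLoop rest ([], t ++ diccionario.getD w [] ++ (c :: r)) := by
  simp only [List.cons_append, traducirLoop, hc, Bool.false_eq_true, if_neg, not_false_iff]
  rw [loop_nonalpha_tail r rest _ h]
  simp

lemma main_lemma : ∀ (n : Nat) (cs : List Char), cs.length ≤ n →
    ∀ (pending : List Char) (acc : List (List Char)),
    (pending = [] ∨ ∀ c ∈ cs.head?, PySem.Chars.isalpha c = false) →
    (traducirLoop cs (pending, acc.flatten)).2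
      = ((groupRuns cs).foldl bStep (pending, acc)).2.flatten := by
  intro n
  induction n with
  | zero =>
      intro cs hlen pending acc _
      have : cs = [] := List.length_eq_zero_iff.mp (Nat.le_zero.mp hlen)
      subst this; simp [groupRuns, traducirLoop]
  | succ n ih =>
      intro cs hlen pending acc hp
      match cs with
      | [] => simp [groupRuns, traducirLoop]
      | c :: cs' =>
        rw [groupRuns]
        set k := PySem.Chars.isalpha c with hk
        set run := cs'.takeWhile (fun d => PySem.Chars.isalpha d == k) with hrun
        set rest := cs'.dropWhile (fun d => PySem.Chars.isalpha d == k) with hrest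
        have hsplit : c :: cs' = (c :: run) ++ rest := by
          simp [hrun, hrest, List.takeWhile_append_dropWhile]
        have hrunall : ∀ d ∈ run, PySem.Chars.isalpha d = k := by
          intro d hd
          have := List.mem_takeWhile_imp hd
          simpa using this
        have hrestlen : rest.length ≤ n := by
          have h1 : rest.length ≤ cs'.length := List.length_dropWhile_le _ _
          simp only [List.length_cons] at hlen; omega
        have hresthead : ∀ d ∈ rest.head?, (PySem.Chars.isalpha d == k) = false := by
          intro d hd
          have h := List.head?_dropWhile_not (fun d => PySem.Chars.isalpha d == k) cs'
          rw [← hrest] at h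
          cases hrh : rest.head? with
          | none => simp [hrh] at hd
          | some x =>
              rw [hrh] at h hd
              simp only [Option.mem_def, Option.some.injEq] at hd
              subst hd
              simpa using h
        cases hk' : k with
        | true =>
            -- alpha group: pending must be []
            have hpend : pending = [] := by
              rcases hp with h | h
              · exact h
              · have hca : PySem.Chars.isalpha c = false := h c (by simp)
                have hkf : k = false := by rw [hk, hca]
                rw [hkf] at hk'; cases hk'
            subst hpend
            rw [hsplit]
            rw [loop_alpha (c :: run) rest [] _ (by
              intro d hd
              rcases List.mem_cons.mp hd with h | h
              · subst h; rw [← hk]; exact hk'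
              · exact (hrunall d h).trans hk')]
            simp only [List.nil_append, List.foldl_cons, bStep, if_pos]
            exact ih rest hrestlen (c :: run) acc (by
              right; intro d hd
              have := hresthead d hd
              simpa [hk'] using this)
        | false =>
            rw [hsplit]
            rw [loop_nonalpha c run rest pending _ (by rw [← hk]; exact hk')
              (fun d hd => (hrunall d hd).trans hk')]
            simp only [List.foldl_cons, bStep, Bool.false_eq_true, if_neg, not_false_iff]
            have : (acc.flatten ++ diccionario.getD pending [] ++ (c :: run))
                = (acc ++ [diccionario.getD pending [] ++ (c :: run)]).flatten := by
              simp
            rw [this]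
            exact ih rest hrestlen [] _ (Or.inl rfl)

-- ===== VERDICT (by name: the statement is the Claim_ definition above) =====
theorem traducir_spec : Claim_equal_traducir := by
  intro texto _
  unfold Spec_traducir traducir traducir_alt
  have := main_lemma texto.toList.length texto.toList (le_refl _) [] [] (Or.inl rfl)
  simp only [List.flatten_nil] at this
  rw [this]
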